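-- pv_equiv track=rewrite | github.com/fluidpotata/BRACU_CSE221 | Assignments/Assignment 07/Task_02.py | maximum_activities
-- ===== SOURCE A (Python) =====
-- def maximum_activities(tasks, M):
--     tasks.sort(key=lambda x: x[1])  # Sort tasks based on end times
--     assigned = [False] * M
--     count = 0
--
--     for task in tasks:
--         for i in range(M):
--             if not assigned[i] and task[0] >= task[1]:  # Ensure the task is valid
--                 assigned[i] = True
--                 count += 1
--                 break
--
--     return count
-- ===== SOURCE B (Python) =====
-- def maximum_activities(tasks, M):
--     tasks.sort(key=lambda x: x[1])
--     count = 0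
--     for task in tasks:
--         if count >= M:
--             break
--         if task[0] >= task[1]:
--             count += 1
--     return count
-- ===== Notes on version B (the rewrite author's own statement) =====
-- stated objective: simpler
-- what changed: Dropped the assigned boolean array and the inner range(M) machine scan; a single pass over the sorted tasks keeps one integer counter and stops once it reaches M.
import Mathlib
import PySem

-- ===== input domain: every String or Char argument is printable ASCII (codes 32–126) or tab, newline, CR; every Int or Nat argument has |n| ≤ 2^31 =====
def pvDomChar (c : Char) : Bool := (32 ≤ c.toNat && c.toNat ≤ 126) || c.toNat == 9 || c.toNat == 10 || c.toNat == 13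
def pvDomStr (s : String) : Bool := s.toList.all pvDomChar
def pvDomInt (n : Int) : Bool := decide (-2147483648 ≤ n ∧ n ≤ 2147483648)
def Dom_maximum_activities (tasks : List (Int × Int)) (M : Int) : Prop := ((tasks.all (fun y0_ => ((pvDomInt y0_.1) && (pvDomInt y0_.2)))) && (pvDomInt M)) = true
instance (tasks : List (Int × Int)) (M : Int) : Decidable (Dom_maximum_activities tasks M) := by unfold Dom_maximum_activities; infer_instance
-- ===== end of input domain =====

-- B drops A's `assigned` boolean array and its inner range(M) scan: one pass over the
-- sorted tasks with a single counter, stopping at M.  Both sort `tasks` in place in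
-- Python; the equivalence proved here is about the RETURN value (the mutation is identical).

-- ===== PORT A =====
-- inner `for i in range(M)` loop of A; the Python list `assigned` is ported as an
-- Array Bool (O(1) indexing, like a Python list).  Every index i comes from
-- range(M), so 0 ≤ i < len(assigned) always holds when the access is reached and
-- the `?`-lookup default / set! in-bounds guard are never exercised.
def pvScanA : List Int → Array Bool → Int → (Int × Int) → Array Bool × Int
  | [], assigned, count, _ => (assigned, count)
  | i :: is, assigned, count, t =>
    if (assigned[i.toNat]?).getD false = false ∧ t.1 ≥ t.2 then
      (assigned.set! i.toNat true, count + 1)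
    else pvScanA is assigned count t

def maximum_activities (tasks : List (Int × Int)) (M : Int) : Int :=
  let ts := PySem.List.sorted tasks (fun x => x.2)
  (ts.foldl (fun st task => pvScanA (PySem.List.pyRange 0 M 1) st.1 st.2 task)
    ((List.replicate M.toNat false).toArray, 0)).2

-- ===== PORT B =====
def pvGoB : List (Int × Int) → Int → Int → Int
  | [], _, count => count
  | t :: rest, M, count =>
    if count ≥ M then count
    else if t.1 ≥ t.2 then pvGoB rest M (count + 1)
    else pvGoB rest M count

def maximum_activities_alt (tasks : List (Int × Int)) (M : Int) : Int :=
  pvGoB (PySem.List.sorted tasks (fun x => x.2)) M 0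

-- ===== PRECONDITION & SPEC =====
def Spec_maximum_activities (tasks : List (Int × Int)) (M : Int) (out : Int) : Prop := out = maximum_activities_alt tasks M
instance (tasks : List (Int × Int)) (M : Int) (out : Int) : Decidable (Spec_maximum_activities tasks M out) := by unfold Spec_maximum_activities; infer_instance

-- ===== CLAIM (what is proved, stated in full; the proofs are below) =====
def Claim_equal_maximum_activities : Prop := ∀ (tasks : List (Int × Int)) (M : Int), Dom_maximum_activities tasks M → Spec_maximum_activities tasks M (maximum_activities tasks M)

-- ===== LEMMAS AND PROOFS =====

-- a task with start < end changes nothing, whatever the machine list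
lemma pvScanA_nocond (is : List Int) (assigned : Array Bool) (count : Int)
    (t : Int × Int) (h : ¬ t.1 ≥ t.2) :
    pvScanA is assigned count t = (assigned, count) := by
  induction is with
  | nil => rfl
  | cons i is ih => simp [pvScanA, h, ih]

-- once count ≥ M, B returns count unchanged
lemma pvGoB_of_ge (ts : List (Int × Int)) (M count : Int) (h : count ≥ M) :
    pvGoB ts M count = count := by
  cases ts with
  | nil => rfl
  | cons t ts => simp [pvGoB, h]

-- the inner scan on a machine list `replicate n true ++ replicate k false`,
-- started anywhere at or before position n
lemma pvScanA_spec (t : Int × Int) (ht : t.1 ≥ t.2) (n k : Nat) :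
    ∀ (d j : Nat) (count : Int), j ≤ n → n - j = d →
    pvScanA (PySem.List.pyRange j (n + k) 1)
      (List.replicate n true ++ List.replicate k false).toArray count t =
    if 0 < k then
      ((List.replicate (n+1) true ++ List.replicate (k-1) false).toArray, count + 1)
    else ((List.replicate n true ++ List.replicate k false).toArray, count) := by
  intro d
  induction d with
  | zero =>
    intro j count hj hd
    have hjn : j = n := by omega
    subst hjn
    cases k with
    | zero =>
      rw [PySem.List.pyRange_one_eq_nil (by push_cast; omega)]
      simp [pvScanA]
    | succ k =>
      rw [PySem.List.pyRange_one_cons (by push_cast; omega)]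
      have hget : ((List.replicate j true ++ List.replicate (k+1) false).toArray)[((j : Int)).toNat]?
          = some false := by
        rw [Int.toNat_natCast, List.getElem?_toArray]
        rw [List.getElem?_append_right (by simp)]
        simp
      rw [pvScanA, hget]
      simp only [Option.getD_some, ht, and_true]
      rw [if_pos trivial]
      have hset : ((List.replicate j true ++ List.replicate (k+1) false).toArray).set! ((j:Int)).toNat true
          = (List.replicate (j+1) true ++ List.replicate k false).toArray := by
        have h1 : (List.replicate j true ++ List.replicate (k+1) false).set ((j:Int)).toNat true
            = List.replicate (j+1) true ++ List.replicate k false := by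
          rw [Int.toNat_natCast, List.replicate_succ]
          rw [List.set_append_right _ _ (by simp)]
          simp [List.replicate_succ' (n := j)]
        rw [show ∀ (l : List Bool) (i : Nat), l.toArray.set! i true = (l.set i true).toArray
              from fun l i => by simp [Array.set!]]
        rw [h1]
      rw [hset]
      simp
  | succ d ih =>
    intro j count hj hd
    have hjn : j < n := by omega
    rw [PySem.List.pyRange_one_cons (by omega)]
    have hget : ((List.replicate n true ++ List.replicate k false).toArray)[((j : Int)).toNat]?
        = some true := by
      rw [Int.toNat_natCast, List.getElem?_toArray]
      rw [List.getElem?_append_left (by simpa using hjn)]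
      simp [hjn]
    rw [pvScanA, hget]
    have hc : ¬((some true).getD false = false ∧ t.1 ≥ t.2) := by simp
    rw [if_neg hc]
    have : ((j:Int) + 1) = ((j+1 : Nat) : Int) := by push_cast; ring
    rw [this]
    exact ih (j+1) count (by omega) (by omega)

-- the main fold, for nonnegative M, in lock-step with B
lemma pv_fold_eq (M : Int) (hM : 0 ≤ M) :
    ∀ (ts : List (Int × Int)) (n : Nat), n ≤ M.toNat →
    (ts.foldl (fun st task => pvScanA (PySem.List.pyRange 0 M 1) st.1 st.2 task)
      ((List.replicate n true ++ List.replicate (M.toNat - n) false).toArray, (n : Int))).2 =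
    pvGoB ts M n := by
  intro ts
  induction ts with
  | nil => intro n _; rfl
  | cons t ts ih =>
    intro n hn
    have hMeq : ((M.toNat : Nat) : Int) = M := Int.toNat_of_nonneg hM
    rw [List.foldl_cons]
    by_cases ht : t.1 ≥ t.2
    · rcases Nat.lt_or_ge n M.toNat with hlt | hge
      · have hstep : pvScanA (PySem.List.pyRange 0 M 1)
            (List.replicate n true ++ List.replicate (M.toNat - n) false).toArray (n : Int) t
            = ((List.replicate (n+1) true ++ List.replicate (M.toNat - n - 1) false).toArray, (n : Int) + 1) := by
          have hrange : PySem.List.pyRange 0 M 1 = PySem.List.pyRange ((0:Nat) : Int) ((n : Int) + ((M.toNat - n : Nat) : Int)) 1 := by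
            congr 1
            omega
          rw [hrange, pvScanA_spec t ht n (M.toNat - n) n 0 (n : Int) (by omega) (by omega)]
          rw [if_pos (show 0 < M.toNat - n by omega)]
        simp only [hstep]
        have h1 : (M.toNat - n - 1 : Nat) = M.toNat - (n+1) := by omega
        have h2 : ((n : Int) + 1) = ((n+1 : Nat) : Int) := by push_cast; ring
        rw [h1, h2, ih (n+1) (by omega)]
        rw [pvGoB]
        rw [if_neg (by omega), if_pos ht, h2]
      · have hn' : n = M.toNat := by omega
        subst hn'
        have hstep : pvScanA (PySem.List.pyRange 0 M 1)
            (List.replicate M.toNat true ++ List.replicate (M.toNat - M.toNat) false).toArray ((M.toNat : Nat) : Int) t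
            = ((List.replicate M.toNat true ++ List.replicate (M.toNat - M.toNat) false).toArray, ((M.toNat : Nat) : Int)) := by
          have hrange : PySem.List.pyRange 0 M 1 = PySem.List.pyRange ((0:Nat) : Int) (((M.toNat : Nat) : Int) + ((0:Nat) : Int)) 1 := by
            congr 1
            omega
          have h0 : (M.toNat - M.toNat : Nat) = 0 := by omega
          rw [h0, hrange, pvScanA_spec t ht M.toNat 0 M.toNat 0 ((M.toNat : Nat) : Int) (by omega) (by omega)]
          simp
        simp only [hstep]
        rw [ih M.toNat (le_refl _)]
        rw [pvGoB, if_pos (by omega), pvGoB_of_ge ts M _ (by omega)]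
    · simp only [pvScanA_nocond _ _ _ _ ht]
      rcases Nat.lt_or_ge n M.toNat with hlt | hge
      · rw [ih n hn, pvGoB, if_neg (by omega), if_neg ht]
      · have hn' : n = M.toNat := by omega
        subst hn'
        rw [ih M.toNat (le_refl _)]
        rw [pvGoB, if_pos (by omega), pvGoB_of_ge ts M _ (by omega)]

-- fold of the identity step (the M < 0 case: the range is empty)
lemma pv_fold_id (ts : List (Int × Int)) (st : Array Bool × Int) :
    (ts.foldl (fun (st : Array Bool × Int) (_ : Int × Int) => (st.1, st.2)) st) = st := by
  induction ts generalizing st with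
  | nil => rfl
  | cons t ts ih => rw [List.foldl_cons]; exact ih _

theorem maximum_activities_spec : Claim_equal_maximum_activities := by
  intro tasks M _
  unfold Spec_maximum_activities maximum_activities maximum_activities_alt
  by_cases hM : 0 ≤ M
  · have h0 : ((List.replicate M.toNat false).toArray, (0:Int))
        = ((List.replicate 0 true ++ List.replicate (M.toNat - 0) false).toArray, ((0:Nat) : Int)) := by
      simp
    rw [h0]
    exact pv_fold_eq M hM _ 0 (by omega)
  · have hM' : M < 0 := by omega
    have hr : PySem.List.pyRange 0 M 1 = [] := PySem.List.pyRange_one_eq_nil (by omega)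
    have hnil : (List.replicate M.toNat false).toArray = (#[] : Array Bool) := by
      rw [Int.toNat_of_nonpos (by omega)]; rfl
    rw [hr, hnil]
    have hfun : (fun (st : Array Bool × Int) (task : Int × Int) => pvScanA [] st.1 st.2 task)
        = (fun (st : Array Bool × Int) (_ : Int × Int) => (st.1, st.2)) := by
      funext st t; rfl
    rw [hfun]
    show (List.foldl (fun (st : Array Bool × Int) (_ : Int × Int) => (st.1, st.2)) (#[], 0)
      (PySem.List.sorted tasks (fun x => x.2))).2 = _
    rw [pv_fold_id]
    rw [pvGoB_of_ge _ _ _ (by omega)]
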